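-- pv_equiv track=rewrite | github.com/DavidC0rtes/VITAMIN | utilities/functions.py | get_opponent_moves
-- ===== SOURCE A (Python) =====
-- def format_agents(agents):
--     agents = sorted(agents)
--     if 0 in agents:
--         agents.remove(0)
--     agents = {int(x) - 1 for x in agents}
--     return agents
--
-- def get_opponent_moves(actions, agents):
--     other_moves = set()
--     agents = format_agents(agents)
--     for x in actions:
--         result = ""
--         for i, letter in enumerate(x):
--             if i not in agents:
--                 result += letter
--             else:
--                 result += '-'
--
--         other_moves.add(result)
--     return other_moves
-- ===== SOURCE B (Python) =====
-- def get_opponent_moves(actions, agents):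
--     positions = sorted({a - 1 for a in agents if a >= 1})
--     other_moves = set()
--     for x in actions:
--         chars = list(x)
--         for p in positions:
--             if p >= len(chars):
--                 break
--             chars[p] = '-'
--         other_moves.add("".join(chars))
--     return other_moves
-- ===== Notes on version B (the rewrite author's own statement) =====
-- stated objective: alternative
-- what changed: B precomputes once a sorted, deduped list of 0-based mask positions (a-1 for each agent a >= 1, replacing A's sort/remove-one-0/shift set pipeline) and then, instead of scanning every character of every action and testing set membership, overwrites exactly those positions in a mutable char list, breaking out early at the first position past the end of the string; it trades A's per-character scan for a per-position write.
import Mathlib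
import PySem

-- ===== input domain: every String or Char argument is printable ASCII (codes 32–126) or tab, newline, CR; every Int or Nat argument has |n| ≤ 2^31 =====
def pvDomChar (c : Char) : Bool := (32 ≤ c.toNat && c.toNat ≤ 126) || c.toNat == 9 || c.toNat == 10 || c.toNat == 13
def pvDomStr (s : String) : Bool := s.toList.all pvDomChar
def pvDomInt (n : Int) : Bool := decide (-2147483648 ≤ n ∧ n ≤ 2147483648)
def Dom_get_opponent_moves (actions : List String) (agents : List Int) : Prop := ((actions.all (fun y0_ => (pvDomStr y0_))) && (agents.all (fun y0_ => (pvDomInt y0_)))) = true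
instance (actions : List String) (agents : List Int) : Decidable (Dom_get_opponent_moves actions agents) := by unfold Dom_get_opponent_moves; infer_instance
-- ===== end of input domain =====

-- B precomputes a sorted deduped list of mask positions and writes '-' directly at each position
-- (early break past the string's end), instead of A's set pipeline plus a membership test per character.


-- ===== PORT A =====
def format_agents (agents : List Int) : PySem.Set Int :=
  let a1 := PySem.List.sorted agents (fun x => x) false
  let a2 := if (0 : Int) ∈ a1 then (PySem.List.remove? a1 0).getD a1 else a1
  PySem.Set.ofList (a2.map (fun x => x - 1))

def get_opponent_moves (actions : List String) (agents : List Int) : List String :=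
  let ag := format_agents agents
  actions.foldl (fun other_moves x =>
    let result := (PySem.List.enumerate x.toList 0).foldl (fun r p =>
      if p.1 ∉ ag then r ++ [p.2] else r ++ ['-']) []
    PySem.Set.add other_moves (String.mk result)) PySem.Set.empty

-- ===== PORT B =====
def maskLoop (positions : List Int) (cs : List Char) : List Char :=
  match positions with
  | [] => cs
  | p :: ps => if p ≥ (cs.length : Int) then cs else maskLoop ps (PySem.List.pySetD cs p '-')

def get_opponent_moves_alt (actions : List String) (agents : List Int) : List String :=
  let positions := PySem.List.sorted
    (PySem.Set.ofList ((agents.filter (fun a => 1 ≤ a)).map (fun a => a - 1))) (fun x => x) false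
  actions.foldl (fun other_moves x =>
    PySem.Set.add other_moves (String.mk (maskLoop positions x.toList))) PySem.Set.empty

-- ===== PRECONDITION & SPEC =====
def Spec_get_opponent_moves (actions : List String) (agents : List Int) (out : List String) : Prop := out = get_opponent_moves_alt actions agents
instance (actions : List String) (agents : List Int) (out : List String) : Decidable (Spec_get_opponent_moves actions agents out) := by unfold Spec_get_opponent_moves; infer_instance

-- ===== CLAIM (what is proved, stated in full; the proofs are below) =====
def Claim_equal_get_opponent_moves : Prop := ∀ (actions : List String) (agents : List Int), Dom_get_opponent_moves actions agents → Spec_get_opponent_moves actions agents (get_opponent_moves actions agents)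

-- ===== LEMMAS AND PROOFS =====

-- B's inner loop, pointwise through getElem? (sorted, nonnegative positions)
theorem maskLoop_getElem? (ps : List Int) (hs : ps.Pairwise (· ≤ ·)) (hnn : ∀ p ∈ ps, 0 ≤ p)
    (cs : List Char) (j : Nat) :
    (maskLoop ps cs)[j]? = if (j : Int) ∈ ps then cs[j]?.map (fun _ => '-') else cs[j]? := by
  induction ps generalizing cs with
  | nil => simp [maskLoop]
  | cons p t ih =>
    rw [maskLoop]
    rcases List.pairwise_cons.mp hs with ⟨hple, hst⟩
    by_cases hb : p ≥ (cs.length : Int)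
    · rw [if_pos hb]
      by_cases hm : (j : Int) ∈ p :: t
      · have hj : (cs.length : Int) ≤ (j : Int) := by
          rcases List.mem_cons.mp hm with h | h
          · omega
          · have := hple _ h; omega
        rw [if_pos hm, List.getElem?_eq_none (by omega)]
        rfl
      · rw [if_neg hm]
    · rw [if_neg hb, ih hst (fun q hq => hnn q (List.mem_cons_of_mem _ hq))]
      have hp0 : 0 ≤ p := hnn p (List.mem_cons_self ..)
      have hset : (PySem.List.pySetD cs p '-')[j]? =
          if p = (j : Int) then cs[j]?.map (fun _ => '-') else cs[j]? := by
        rw [PySem.List.pySetD_of_nonneg _ _ hp0, List.getElem?_set]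
        by_cases hpj : p = (j : Int)
        · rw [if_pos hpj, if_pos (by omega), if_pos (by omega),
            List.getElem?_eq_getElem (by omega)]
          rfl
        · rw [if_neg hpj, if_neg (by omega)]
      rw [hset]
      by_cases hpj : p = (j : Int) <;> by_cases hm : (j : Int) ∈ t <;>
        simp [hpj, hm, List.mem_cons, eq_comm] <;> cases cs[j]? <;> simp

-- membership of a nonnegative index in A's formatted agent set
theorem mem_format_agents (agents : List Int) (j : Nat) :
    ((j : Int) ∈ format_agents agents) ↔ ((j : Int) + 1) ∈ agents := by
  unfold format_agents
  simp only [PySem.Set.mem_ofList, List.mem_map]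
  constructor
  · rintro ⟨a, ha, hae⟩
    have ha1 : a = (j : Int) + 1 := by omega
    subst ha1
    have hmem : ((j : Int) + 1) ∈ PySem.List.sorted agents (fun x => x) false := by
      by_cases h0 : (0 : Int) ∈ PySem.List.sorted agents (fun x => x) false
      · rw [if_pos h0, PySem.List.remove?_eq_some_erase _ _ h0] at ha
        exact (List.mem_erase_of_ne (by omega)).mp ha
      · rwa [if_neg h0] at ha
    exact (PySem.List.mem_sorted _ _ _ _).mp hmem
  · intro h
    refine ⟨(j : Int) + 1, ?_, by ring⟩
    have hm : ((j : Int) + 1) ∈ PySem.List.sorted agents (fun x => x) false :=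
      (PySem.List.mem_sorted _ _ _ _).mpr h
    by_cases h0 : (0 : Int) ∈ PySem.List.sorted agents (fun x => x) false
    · rw [if_pos h0, PySem.List.remove?_eq_some_erase _ _ h0]
      exact (List.mem_erase_of_ne (by omega)).mpr hm
    · rwa [if_neg h0]

-- membership of a nonnegative index in B's position list
theorem mem_positions (agents : List Int) (j : Nat) :
    ((j : Int) ∈ PySem.List.sorted
      (PySem.Set.ofList ((agents.filter (fun a => 1 ≤ a)).map (fun a => a - 1))) (fun x => x) false)
    ↔ ((j : Int) + 1) ∈ agents := by
  rw [PySem.List.mem_sorted, PySem.Set.mem_ofList]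
  simp only [List.mem_map, List.mem_filter]
  constructor
  · rintro ⟨a, ⟨ha, _⟩, hae⟩
    have : a = (j : Int) + 1 := by omega
    subst this
    exact ha
  · intro h
    exact ⟨(j : Int) + 1, ⟨h, by simp⟩, by ring⟩

-- A's and B's masked strings agree on every action
theorem mask_eq (agents : List Int) (x : String) :
    ((PySem.List.enumerate x.toList 0).foldl (fun r p =>
      if p.1 ∉ format_agents agents then r ++ [p.2] else r ++ ['-']) [])
    = maskLoop (PySem.List.sorted
        (PySem.Set.ofList ((agents.filter (fun a => 1 ≤ a)).map (fun a => a - 1))) (fun x => x) false)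
      x.toList := by
  have hfun : (fun (r : List Char) (p : Int × Char) =>
        if p.1 ∉ format_agents agents then r ++ [p.2] else r ++ ['-'])
      = (fun r p => r ++ [if p.1 ∉ format_agents agents then p.2 else '-']) := by
    funext r p
    split_ifs <;> rfl
  rw [hfun, PySem.List.foldl_append_singleton_eq_map, List.nil_append]
  apply List.ext_getElem?
  intro j
  rw [maskLoop_getElem? _ ?sorted ?nonneg, List.getElem?_map, PySem.List.getElem?_enumerate]
  case sorted =>
    have := PySem.List.sorted_pairwise
      (PySem.Set.ofList ((agents.filter (fun a => 1 ≤ a)).map (fun a => a - 1))) (fun x => x)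
    exact this
  case nonneg =>
    intro p hp
    rw [PySem.List.mem_sorted, PySem.Set.mem_ofList] at hp
    simp only [List.mem_map, List.mem_filter] at hp
    rcases hp with ⟨a, ⟨_, ha⟩, rfl⟩
    simp only [decide_eq_true_eq] at ha
    omega
  simp only [mem_positions]
  by_cases hm : ((j : Int) + 1) ∈ agents
  · have hm2 : ((j : Int)) ∈ format_agents agents := (mem_format_agents agents j).mpr hm
    cases x.toList[j]? <;> simp [hm, hm2]
  · have hm2 : ((j : Int)) ∉ format_agents agents :=
      fun h => hm ((mem_format_agents agents j).mp h)
    cases x.toList[j]? <;> simp [hm, hm2]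

-- ===== VERDICT (by name: the statement is the Claim_ definition above) =====
theorem get_opponent_moves_spec : Claim_equal_get_opponent_moves := by
  intro actions agents _
  unfold Spec_get_opponent_moves get_opponent_moves get_opponent_moves_alt
  simp only
  congr 1
  funext om x
  rw [mask_eq]
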